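-- pv_equiv track=rewrite | github.com/Paul9inee/Elementary_Algorithm | sanghwa_week3/[3주차] 가로등.py | solution
-- ===== SOURCE A (Python) =====
-- import math
--
-- def solution(l, v):
--     v.sort()
--     distance = []
--     for lamp1, lamp2 in zip(v[1:], v[:-1]):  # 가로등 사이의 거리로 /2 한 것이 불빛의 길이 d.
--         d = math.ceil((lamp1 - lamp2) / 2)
--         distance.append(d)
--     distance += [v[0], l - v[-1]]  # 첫 번째, 마지막 가로등 추가
--     return max(distance)  # 가장 긴 길이로 도로를 가려야함.
-- ===== SOURCE B (Python) =====
-- def solution(l, v):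
--     lo = min(v)
--     hi = max(v)
--     best = lo if lo > l - hi else l - hi
--     n = len(v)
--     if n == 1:
--         return best
--     if hi == lo:
--         return best if best > 0 else 0
--     w = -((lo - hi) // (n - 1))  # ceil((hi - lo) / (n - 1)) >= 1
--     buckets = {}
--     for x in v:
--         i = (x - lo) // w
--         if i in buckets:
--             a, b = buckets[i]
--             buckets[i] = (x if x < a else a, x if x > b else b)
--         else:
--             buckets[i] = (x, x)
--     maxgap = 0
--     prev = lo
--     for i in range((hi - lo) // w + 1):
--         if i in buckets:
--             a, b = buckets[i]
--             if a - prev > maxgap: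
--                 maxgap = a - prev
--             prev = b
--     g = (maxgap + 1) // 2
--     return g if g > best else best
-- ===== Notes on version B (the rewrite author's own statement) =====
-- stated objective: alternative
-- what changed: B replaces sorting plus an adjacent-gap scan by the pigeonhole maximum-gap algorithm: one pass bucketing each value by (x-lo)//w with w=ceil((hi-lo)/(n-1)) keeping per-bucket min/max, then a scan over bucket indices (correct because the maximum gap is at least w, so it always straddles buckets); exact integer ceiling division replaces float math.ceil. B does O(n) work but is not faster in a timing run (Python-level dict updates vs C Timsort), and unlike A it does not mutate v.
import Mathlib
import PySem

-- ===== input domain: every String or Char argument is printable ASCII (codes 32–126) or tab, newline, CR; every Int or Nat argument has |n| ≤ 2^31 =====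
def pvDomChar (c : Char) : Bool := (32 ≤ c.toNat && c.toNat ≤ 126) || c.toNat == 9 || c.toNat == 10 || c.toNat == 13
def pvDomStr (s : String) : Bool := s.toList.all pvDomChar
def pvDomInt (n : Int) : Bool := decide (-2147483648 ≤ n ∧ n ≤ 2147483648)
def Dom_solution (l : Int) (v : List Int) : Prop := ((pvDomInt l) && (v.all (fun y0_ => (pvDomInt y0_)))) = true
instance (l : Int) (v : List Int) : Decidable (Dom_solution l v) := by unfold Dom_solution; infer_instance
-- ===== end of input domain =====

-- B replaces A's sort + adjacent-gap scan by the classic pigeonhole maximum-gap algorithm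
-- (one bucketing pass keeping per-bucket min/max, then a scan over bucket indices); A sorts v
-- in place in Python, B does not mutate v — the equivalence proved here is about the return value.

-- ===== PORT A =====
-- math.ceil((a-b)/2): on |ints| ≤ 2^31 the float division is exact, so this equals -((-(a-b)) // 2) exactly.
def solution (l : Int) (v : List Int) : Int :=
  let s := PySem.List.sorted v (fun x => x) false
  let distance := (List.zip (PySem.List.slice s (some 1) none) (PySem.List.slice s none (some (-1)))).foldl
      (fun acc p => acc ++ [-(PySem.Int.floordiv (-(p.1 - p.2)) 2)]) []
  let distance := distance ++ [PySem.List.pyGetD s 0 0, l - PySem.List.pyGetD s (-1) 0]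
  match PySem.List.max? distance (fun y => y) with
  | some m => m
  | none => 0

-- ===== PORT B =====
-- B-side helpers: the body of B's two for-loops (the bucketing pass and the index scan)
def pvBStep (lo w : Int) (d : PySem.Dict Int (Int × Int)) (x : Int) : PySem.Dict Int (Int × Int) :=
  let i := PySem.Int.floordiv (x - lo) w
  match d.get? i with
  | some ab => d.insert i ((if x < ab.1 then x else ab.1), (if x > ab.2 then x else ab.2))
  | none => d.insert i (x, x)

def pvBScan (buckets : PySem.Dict Int (Int × Int)) (mp : Int × Int) (i : Int) : Int × Int :=
  match buckets.get? i with
  | some ab => ((if ab.1 - mp.2 > mp.1 then ab.1 - mp.2 else mp.1), ab.2)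
  | none => mp

def solution_alt (l : Int) (v : List Int) : Int :=
  match PySem.List.min? v (fun y => y), PySem.List.max? v (fun y => y) with
  | some lo, some hi =>
    let best := if lo > l - hi then lo else l - hi
    let n : Int := (v.length : Int)
    if n = 1 then best
    else if hi = lo then (if best > 0 then best else 0)
    else
      let w := -(PySem.Int.floordiv (lo - hi) (n - 1))
      let buckets := v.foldl (pvBStep lo w) PySem.Dict.empty
      let mp := (PySem.List.pyRange 0 (PySem.Int.floordiv (hi - lo) w + 1)).foldl (pvBScan buckets) (0, lo)
      let g := PySem.Int.floordiv (mp.1 + 1) 2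
      if g > best then g else best
  | _, _ => 0

-- ===== PRECONDITION & SPEC =====
-- A raises IndexError on v = [] (v[0]); B's min(v) raises there too.
def Pre_solution (l : Int) (v : List Int) : Prop := v ≠ []
instance (l : Int) (v : List Int) : Decidable (Pre_solution l v) := by unfold Pre_solution; infer_instance
def pvWitness_solution : Int × List Int := (10, [3, 7])

def Spec_solution (l : Int) (v : List Int) (out : Int) : Prop := out = solution_alt l v
instance (l : Int) (v : List Int) (out : Int) : Decidable (Spec_solution l v out) := by unfold Spec_solution; infer_instance

-- ===== CLAIM (what is proved, stated in full; the proofs are below) =====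
def Claim_equal_solution : Prop := ∀ (l : Int) (v : List Int), Dom_solution l v → Pre_solution l v → Spec_solution l v (solution l v)

-- ===== LEMMAS AND PROOFS =====

-- adjacent differences of a sorted chain, and A's halved (ceil) gaps
def pvDiffs : Int → List Int → List Int
  | _, [] => []
  | p, x :: xs => (x - p) :: pvDiffs x xs

def pvGaps : Int → List Int → List Int
  | _, [] => []
  | p, x :: xs => PySem.Int.floordiv (x - p + 1) 2 :: pvGaps x xs

def pvHalf (d : Int) : Int := PySem.Int.floordiv (d + 1) 2

def pvIdx (lo w x : Int) : Int := PySem.Int.floordiv (x - lo) w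

-- the bucket dict's contents, stated over a filter of the input
def pvBSpec (lo w : Int) (u : List Int) (i : Int) : Option (Int × Int) :=
  match u.filter (fun x => pvIdx lo w x == i) with
  | [] => none
  | z :: zs => some (zs.foldl min z, zs.foldl max z)

-- the scan-loop invariant after processing bucket indices 0 … N-1
def pvInv (v : List Int) (lo w M : Int) (N : Nat) (mp : Int × Int) : Prop :=
  mp.2 ∈ v ∧ (∀ x ∈ v, pvIdx lo w x < (N : Int) → x ≤ mp.2) ∧
  (mp.2 = lo ∨ pvIdx lo w mp.2 < (N : Int)) ∧
  0 ≤ mp.1 ∧ mp.1 ≤ M ∧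
  (∀ x y : Int, x ∈ v → y ∈ v → x < y → (∀ z ∈ v, z ≤ x ∨ y ≤ z) →
    pvIdx lo w x < pvIdx lo w y → pvIdx lo w y < (N : Int) → y - x ≤ mp.1)

theorem pv_ceil_eq (a b : Int) :
    -(PySem.Int.floordiv (-(a - b)) 2) = PySem.Int.floordiv (a - b + 1) 2 := by
  rw [PySem.Int.floordiv_eq_ediv_of_pos (by omega), PySem.Int.floordiv_eq_ediv_of_pos (by omega)]
  omega

theorem pv_dist_eq (h : Int) (t : List Int) :
    (List.zip t ((h :: t).dropLast)).foldl
      (fun acc p => acc ++ [-(PySem.Int.floordiv (-(p.1 - p.2)) 2)]) []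
      = pvGaps h t := by
  rw [PySem.List.foldl_append_singleton_eq_map]
  induction t generalizing h with
  | nil => rfl
  | cons x xs ih =>
    simp only [List.dropLast_cons₂, List.zip_cons_cons, List.map_cons, pvGaps, List.nil_append]
    rw [pv_ceil_eq]
    have := ih x
    simp only [List.nil_append] at this
    rw [List.cons.injEq]
    exact ⟨rfl, this⟩

theorem pv_foldl_max_max (xs : List Int) (a b : Int) :
    xs.foldl max (max a b) = max a (xs.foldl max b) := by
  induction xs generalizing b with
  | nil => rfl
  | cons y ys ih =>
    simp only [List.foldl_cons, max_assoc]
    exact ih (max b y)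

theorem pv_max_append (gs : List Int) (u w : Int) :
    PySem.List.max? (gs ++ [u, w]) (fun y => y) = some (max (gs.foldl max u) w) := by
  cases gs with
  | nil => simp [PySem.List.max?_id_cons, List.foldl]
  | cons d ds =>
    rw [List.cons_append, PySem.List.max?_id_cons, List.foldl_append]
    simp only [List.foldl_cons, List.foldl_nil]
    rw [Option.some.injEq, pv_foldl_max_max, max_comm (List.foldl max d ds) u]

theorem pvGaps_eq_map (p : Int) (t : List Int) : pvGaps p t = (pvDiffs p t).map pvHalf := by
  induction t generalizing p with
  | nil => rfl
  | cons x xs ih => simp only [pvGaps, pvDiffs, List.map_cons, pvHalf, ih]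

theorem pvHalf_mono {a b : Int} (h : a ≤ b) : pvHalf a ≤ pvHalf b := by
  unfold pvHalf
  rw [PySem.Int.floordiv_eq_ediv_of_pos (by omega), PySem.Int.floordiv_eq_ediv_of_pos (by omega)]
  exact Int.ediv_le_ediv (by omega) (by omega)

theorem pvFoldMap_mono (ds : List Int) (a : Int) :
    (ds.map pvHalf).foldl max (pvHalf a) = pvHalf (ds.foldl max a) := by
  induction ds generalizing a with
  | nil => rfl
  | cons d ds ih =>
    simp only [List.map_cons, List.foldl_cons]
    have : max (pvHalf a) (pvHalf d) = pvHalf (max a d) := by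
      rcases le_total a d with h | h
      · rw [max_eq_right h, max_eq_right (pvHalf_mono h)]
      · rw [max_eq_left h, max_eq_left (pvHalf_mono h)]
    rw [this, ih]

theorem pvDiffs_length (p : Int) (t : List Int) : (pvDiffs p t).length = t.length := by
  induction t generalizing p with
  | nil => rfl
  | cons x xs ih => simp [pvDiffs, ih]

theorem pvDiffs_sum (p : Int) (t : List Int) : (pvDiffs p t).sum = t.getLastD p - p := by
  induction t generalizing p with
  | nil => simp [pvDiffs]
  | cons x xs ih =>
    rw [List.getLastD_cons]
    simp only [pvDiffs, List.sum_cons, ih x]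
    omega

theorem pvDiffs_nonneg (p : Int) (t : List Int) (hpw : (p :: t).Pairwise (· ≤ ·)) :
    ∀ d ∈ pvDiffs p t, 0 ≤ d := by
  induction t generalizing p with
  | nil => intro d hd; simp [pvDiffs] at hd
  | cons x xs ih =>
    intro d hd
    rw [List.pairwise_cons] at hpw
    obtain ⟨hp, hpw⟩ := hpw
    rcases List.mem_cons.mp hd with hd | hd
    · have := hp x (by simp); omega
    · exact ih x hpw d hd

theorem pvLast_max (p : Int) (t : List Int) (hpw : (p :: t).Pairwise (· ≤ ·)) :
    ∀ y ∈ p :: t, y ≤ t.getLastD p := by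
  induction t generalizing p with
  | nil => intro y hy; simp at hy; simp [hy]
  | cons x xs ih =>
    intro y hy
    rw [List.pairwise_cons] at hpw
    obtain ⟨hp, hpw⟩ := hpw
    have htail := ih x hpw
    rw [List.getLastD_cons]
    rcases List.mem_cons.mp hy with hy | hy
    · calc y = p := hy
        _ ≤ x := hp x (by simp)
        _ ≤ xs.getLastD x := htail x (by simp)
    · exact htail y hy

theorem pvGapMem (p : Int) (t : List Int) (hpw : (p :: t).Pairwise (· ≤ ·)) {x y : Int}
    (hx : x ∈ p :: t) (hy : y ∈ p :: t) (hxy : x < y)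
    (hgap : ∀ z ∈ p :: t, z ≤ x ∨ y ≤ z) : y - x ∈ pvDiffs p t := by
  induction t generalizing p with
  | nil =>
    simp at hx hy; omega
  | cons b r ih =>
    rw [List.pairwise_cons] at hpw
    obtain ⟨hp, hpw⟩ := hpw
    have hyne : y ≠ p := by
      intro hyp
      have hpx : p ≤ x := by
        rcases List.mem_cons.mp hx with hx | hx
        · omega
        · exact hp x hx
      omega
    have hytail : y ∈ b :: r := by
      rcases List.mem_cons.mp hy with hy | hy
      · exact absurd hy hyne
      · exact hy
    rcases List.mem_cons.mp hx with hx | hx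
    · -- x = p
      subst hx
      rcases hgap b (by simp) with hb | hb
      · -- b ≤ x, so b = x and we can recurse with x = b in the tail
        have hxb : b = x := le_antisymm hb (hp b (by simp))
        have hmem : y - x ∈ pvDiffs b r := by
          apply ih b hpw (by simp [hxb]) hytail
          intro z hz
          exact hgap z (by simp [hz])
        simp [pvDiffs, hmem]
      · -- y ≤ b, hence y = b
        have hby : b ≤ y := by
          rcases List.mem_cons.mp hytail with hyb | hyr
          · omega
          · rw [List.pairwise_cons] at hpw
            exact hpw.1 y hyr
        have hyb : y = b := le_antisymm hb hby
        simp [pvDiffs, hyb]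
    · -- x in the tail
      have hmem : y - x ∈ pvDiffs b r := by
        apply ih b hpw hx hytail
        intro z hz
        exact hgap z (by simp [hz])
      simp [pvDiffs, hmem]

theorem pvDiffMem (p : Int) (t : List Int) (hpw : (p :: t).Pairwise (· ≤ ·)) {d : Int}
    (hd : d ∈ pvDiffs p t) :
    ∃ x y : Int, x ∈ p :: t ∧ y ∈ p :: t ∧ y - x = d ∧ ∀ z ∈ p :: t, z ≤ x ∨ y ≤ z := by
  induction t generalizing p with
  | nil => simp [pvDiffs] at hd
  | cons b r ih =>
    rw [List.pairwise_cons] at hpw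
    obtain ⟨hp, hpw⟩ := hpw
    rcases List.mem_cons.mp hd with hd | hd
    · refine ⟨p, b, by simp, by simp, by omega, ?_⟩
      intro z hz
      rcases List.mem_cons.mp hz with hz | hz
      · left; omega
      · right
        rcases List.mem_cons.mp hz with hz | hz
        · omega
        · rw [List.pairwise_cons] at hpw
          exact hpw.1 z hz
    · obtain ⟨x, y, hx, hy, hxy, hgap⟩ := ih b hpw hd
      refine ⟨x, y, by simp [List.mem_cons.mp hx], by simp [List.mem_cons.mp hy], hxy, ?_⟩
      intro z hz
      rcases List.mem_cons.mp hz with hz | hz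
      · left
        subst hz
        exact hp x hx
      · exact hgap z hz

-- bucket dict characterization
theorem pvBStep_eq (lo w : Int) (d : PySem.Dict Int (Int × Int)) (x : Int) :
    pvBStep lo w d x =
      match d.get? (PySem.Int.floordiv (x - lo) w) with
      | some ab => d.insert (PySem.Int.floordiv (x - lo) w)
          ((if x < ab.1 then x else ab.1), (if x > ab.2 then x else ab.2))
      | none => d.insert (PySem.Int.floordiv (x - lo) w) (x, x) := rfl

theorem pvBuck (lo w : Int) (u : List Int) (i : Int) :
    (u.foldl (pvBStep lo w) PySem.Dict.empty).get? i = pvBSpec lo w u i := by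
  induction u using List.reverseRecOn generalizing i with
  | nil => rfl
  | append_singleton u x ih =>
    rw [List.foldl_append, List.foldl_cons, List.foldl_nil, pvBStep_eq]
    by_cases hij : PySem.Int.floordiv (x - lo) w = i
    · -- x lands in bucket i
      subst hij
      have hfi : (u ++ [x]).filter (fun y => pvIdx lo w y == PySem.Int.floordiv (x - lo) w)
          = u.filter (fun y => pvIdx lo w y == PySem.Int.floordiv (x - lo) w) ++ [x] := by
        rw [List.filter_append]
        congr 1
        simp [pvIdx]
      cases hg : (u.foldl (pvBStep lo w) PySem.Dict.empty).get? (PySem.Int.floordiv (x - lo) w) with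
      | none =>
        have hb := (ih _).symm.trans hg
        have hf : u.filter (fun y => pvIdx lo w y == PySem.Int.floordiv (x - lo) w) = [] := by
          unfold pvBSpec at hb
          cases hf' : u.filter (fun y => pvIdx lo w y == PySem.Int.floordiv (x - lo) w) with
          | nil => rfl
          | cons z zs => rw [hf'] at hb; exact absurd hb (by simp)
        simp only []
        rw [PySem.Dict.get?_insert_self]
        unfold pvBSpec
        rw [hfi, hf, List.nil_append]
        rfl
      | some ab =>
        have hb := (ih _).symm.trans hg
        unfold pvBSpec at hb
        simp only []
        rw [PySem.Dict.get?_insert_self]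
        unfold pvBSpec
        rw [hfi]
        cases hf' : u.filter (fun y => pvIdx lo w y == PySem.Int.floordiv (x - lo) w) with
        | nil => rw [hf'] at hb; exact absurd hb (by simp)
        | cons z zs =>
          rw [hf'] at hb
          rw [Option.some.injEq] at hb
          rw [← hb]
          simp only [List.cons_append, Option.some.injEq]
          rw [List.foldl_append, List.foldl_append]
          simp only [List.foldl_cons, List.foldl_nil]
          rw [Prod.mk.injEq]
          constructor
          · rcases lt_or_ge x (zs.foldl min z) with h' | h'
            · rw [if_pos h', min_eq_right (by omega)]
            · rw [if_neg (by omega), min_eq_left h']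
          · rcases lt_or_ge (zs.foldl max z) x with h' | h'
            · rw [if_pos h', max_eq_right (by omega)]
            · rw [if_neg (by omega), max_eq_left h']
    · -- x lands in a different bucket: nothing changes at key i
      have hfi : (u ++ [x]).filter (fun y => pvIdx lo w y == i)
          = u.filter (fun y => pvIdx lo w y == i) := by
        rw [List.filter_append]
        have hx1 : [x].filter (fun y => pvIdx lo w y == i) = [] := by
          simp [pvIdx, hij]
        rw [hx1, List.append_nil]
      have hspec : pvBSpec lo w (u ++ [x]) i = pvBSpec lo w u i := by
        unfold pvBSpec; rw [hfi]
      rw [hspec, ← ih i]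
      cases hg : (u.foldl (pvBStep lo w) PySem.Dict.empty).get? (PySem.Int.floordiv (x - lo) w) with
      | some ab => exact PySem.Dict.get?_insert_of_ne _ _ (fun h' => hij h'.symm)
      | none => exact PySem.Dict.get?_insert_of_ne _ _ (fun h' => hij h'.symm)

theorem pvBSpec_none {lo w : Int} {u : List Int} {i : Int} (h : pvBSpec lo w u i = none) :
    ∀ x ∈ u, pvIdx lo w x ≠ i := by
  unfold pvBSpec at h
  cases hf : u.filter (fun x => pvIdx lo w x == i) with
  | nil =>
    intro x hx hxi
    have := List.filter_eq_nil_iff.mp hf x hx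
    simp [hxi] at this
  | cons z zs => rw [hf] at h; exact absurd h (by simp)

theorem pvBSpec_some {lo w : Int} {u : List Int} {i : Int} {ab : Int × Int}
    (h : pvBSpec lo w u i = some ab) :
    ab.1 ∈ u ∧ pvIdx lo w ab.1 = i ∧ ab.2 ∈ u ∧ pvIdx lo w ab.2 = i ∧
    ∀ x ∈ u, pvIdx lo w x = i → ab.1 ≤ x ∧ x ≤ ab.2 := by
  unfold pvBSpec at h
  cases hf : u.filter (fun x => pvIdx lo w x == i) with
  | nil => rw [hf] at h; exact absurd h (by simp)
  | cons z zs =>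
    rw [hf] at h
    rw [Option.some.injEq] at h
    subst h
    have hsub : ∀ x ∈ z :: zs, x ∈ u ∧ pvIdx lo w x = i := by
      intro x hx
      rw [← hf] at hx
      have := List.mem_filter.mp hx
      simpa using this
    have h1m : zs.foldl min z ∈ z :: zs := by
      rcases PySem.List.foldl_min_mem zs z with h' | h'
      · rw [h']; simp
      · simp [h']
    have h2m : zs.foldl max z ∈ z :: zs := by
      rcases PySem.List.foldl_max_mem zs z with h' | h'
      · rw [h']; simp
      · simp [h']
    refine ⟨(hsub _ h1m).1, (hsub _ h1m).2, (hsub _ h2m).1, (hsub _ h2m).2, ?_⟩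
    intro x hxu hxi
    have hxf : x ∈ z :: zs := by
      rw [← hf]
      exact List.mem_filter.mpr ⟨hxu, by simp [hxi]⟩
    constructor
    · rcases List.mem_cons.mp hxf with hx | hx
      · rw [hx]; exact (PySem.List.foldl_min_le zs z).1
      · exact (PySem.List.foldl_min_le zs z).2 x hx
    · rcases List.mem_cons.mp hxf with hx | hx
      · rw [hx]; exact (PySem.List.le_foldl_max zs z).1
      · exact (PySem.List.le_foldl_max zs z).2 x hx

-- index arithmetic
theorem pvIdx_mono {lo w : Int} (hw : 0 < w) {p q : Int} (h : p ≤ q) :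
    pvIdx lo w p ≤ pvIdx lo w q := by
  unfold pvIdx
  rw [PySem.Int.floordiv_eq_ediv_of_pos hw, PySem.Int.floordiv_eq_ediv_of_pos hw]
  exact Int.ediv_le_ediv hw (by omega)

theorem pvIdx_lt_imp_lt {lo w : Int} (hw : 0 < w) {p q : Int}
    (h : pvIdx lo w p < pvIdx lo w q) : p < q := by
  by_contra hc
  have := pvIdx_mono (lo := lo) hw (by omega : q ≤ p)
  omega

theorem pvIdx_nonneg {lo w : Int} (hw : 0 < w) {x : Int} (h : lo ≤ x) : 0 ≤ pvIdx lo w x := by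
  unfold pvIdx
  rw [PySem.Int.le_floordiv_iff_mul_le hw]
  omega

theorem pvIdx_lo {lo w : Int} (hw : 0 < w) : pvIdx lo w lo = 0 := by
  unfold pvIdx
  rw [PySem.Int.floordiv_eq_iff_of_pos hw]
  constructor <;> omega

-- generic invariant lemma for a fold over range(N)
theorem pvFold_range_inv {β : Type} (f : β → Int → β) (init : β) (P : Nat → β → Prop)
    (h0 : P 0 init) (hstep : ∀ (N : Nat) (st : β), P N st → P (N + 1) (f st (N : Int))) :
    ∀ N : Nat, P N ((PySem.List.pyRange 0 (N : Int)).foldl f init) := by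
  intro N
  induction N with
  | zero => simpa [PySem.List.pyRange_zero_natCast] using h0
  | succ n ih =>
    rw [PySem.List.pyRange_zero_natCast] at *
    rw [List.range_succ, List.map_append, List.foldl_append]
    exact hstep n _ ih

theorem pvIfMax (a b : Int) : (if a > b then a else b) = max a b := by
  rcases lt_or_ge b a with h | h
  · rw [if_pos h, max_eq_left (by omega)]
  · rw [if_neg (by omega), max_eq_right (by omega)]

-- the scan step preserves the invariant
theorem pvInv_step (v : List Int) (lo hi w M : Int)
    (hlo_min : ∀ y ∈ v, lo ≤ y) (hhi_max : ∀ y ∈ v, y ≤ hi)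
    (hw : 0 < w) (hM0 : 0 ≤ M)
    (hgapM : ∀ x y : Int, x ∈ v → y ∈ v → x < y → (∀ z ∈ v, z ≤ x ∨ y ≤ z) → y - x ≤ M) :
    ∀ (N : Nat) (st : Int × Int), pvInv v lo w M N st →
      pvInv v lo w M (N + 1) (pvBScan (v.foldl (pvBStep lo w) PySem.Dict.empty) st (N : Int)) := by
  intro N st hinv
  obtain ⟨h2mem, h2bnd, h2idx, hm0, hmM, hcov⟩ := hinv
  unfold pvBScan
  cases hg : (v.foldl (pvBStep lo w) PySem.Dict.empty).get? (N : Int) with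
  | none =>
    have hnone := pvBSpec_none ((pvBuck lo w v _).symm.trans hg)
    refine ⟨h2mem, ?_, ?_, hm0, hmM, ?_⟩
    · intro x hx hxi
      have hne := hnone x hx
      apply h2bnd x hx
      push_cast at hxi ⊢
      omega
    · rcases h2idx with h' | h'
      · exact Or.inl h'
      · right; push_cast at h' ⊢; omega
    · intro x y hxv hyv hxy hgap hix hiy
      have hne := hnone y hyv
      apply hcov x y hxv hyv hxy hgap hix
      push_cast at hiy ⊢
      omega
  | some ab =>
    obtain ⟨ha_mem, ha_idx, hb_mem, hb_idx, hbnd⟩ := pvBSpec_some ((pvBuck lo w v _).symm.trans hg)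
    simp only []
    have hm'eq : (if ab.1 - st.2 > st.1 then ab.1 - st.2 else st.1) = max st.1 (ab.1 - st.2) := by
      rw [pvIfMax, max_comm]
    rw [hm'eq]
    have hprevb : st.2 ≤ ab.2 := by
      rcases h2idx with h' | h'
      · rw [h']; exact hlo_min ab.2 hb_mem
      · exact le_of_lt (pvIdx_lt_imp_lt hw (by rw [hb_idx]; exact h'))
    refine ⟨hb_mem, ?_, ?_, ?_, ?_, ?_⟩
    · -- new prev bounds everything of index < N+1
      intro x hx hxi
      push_cast at hxi
      by_cases hxN : pvIdx lo w x = (N : Int)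
      · exact (hbnd x hx hxN).2
      · exact le_trans (h2bnd x hx (by omega)) hprevb
    · right; rw [hb_idx]; push_cast; omega
    · exact le_trans hm0 (le_max_left _ _)
    · -- new running max still ≤ M
      apply max_le hmM
      by_cases hlt : st.2 < ab.1
      · apply hgapM st.2 ab.1 h2mem ha_mem hlt
        intro z hz
        by_cases hzle : z ≤ st.2
        · exact Or.inl hzle
        · right
          have hzN : ¬ pvIdx lo w z < (N : Int) := fun hc => by
            have := h2bnd z hz hc; omega
          by_cases hzN' : pvIdx lo w z = (N : Int)
          · exact (hbnd z hz hzN').1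
          · -- z is in a bucket beyond N, while ab.1 is in bucket N
            have hz2 : (N : Int) + 1 ≤ pvIdx lo w z := by omega
            have hz3 : ((N : Int) + 1) * w ≤ z - lo := by
              rw [← PySem.Int.le_floordiv_iff_mul_le hw]; exact hz2
            have ha3 : ab.1 - lo < ((N : Int) + 1) * w := by
              rw [← PySem.Int.floordiv_lt_iff_lt_mul hw]
              rw [show PySem.Int.floordiv (ab.1 - lo) w = pvIdx lo w ab.1 from rfl, ha_idx]
              omega
            omega
      · omega
    · -- coverage of cross-bucket adjacent pairs with idx y < N+1
      intro x y hxv hyv hxy hgap hix hiy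
      push_cast at hiy
      by_cases hyN : pvIdx lo w y = (N : Int)
      · -- the pair is exactly (st.2, ab.1)
        have hxle : x ≤ st.2 := h2bnd x hxv (by omega)
        have hxeq : x = st.2 := by
          by_contra hne
          have hxlt : x < st.2 := lt_of_le_of_ne hxle hne
          rcases h2idx with h' | h'
          · rw [h'] at hxlt; exact absurd hxlt (not_lt.mpr (hlo_min x hxv))
          · have hsty : st.2 < y :=
              pvIdx_lt_imp_lt (lo := lo) hw (show pvIdx lo w st.2 < pvIdx lo w y by omega)
            rcases hgap st.2 h2mem with h'' | h'' <;> omega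
        have hyeq : y = ab.1 := by
          have hay : ab.1 ≤ y := (hbnd y hyv hyN).1
          by_contra hne
          have hay' : ab.1 < y := lt_of_le_of_ne hay (fun h'' => hne h''.symm)
          rcases hgap ab.1 ha_mem with h'' | h''
          · -- ab.1 ≤ x = st.2
            rcases h2idx with h' | h'
            · have hal : ab.1 = lo := le_antisymm (by omega) (hlo_min ab.1 ha_mem)
              have h0 : pvIdx lo w ab.1 = 0 := by rw [hal]; exact pvIdx_lo hw
              have hx0 : 0 ≤ pvIdx lo w x := pvIdx_nonneg hw (hlo_min x hxv)
              omega
            · have := pvIdx_mono (lo := lo) hw (show ab.1 ≤ st.2 by omega)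
              rw [ha_idx] at this
              omega
          · omega
        rw [hxeq, hyeq]
        exact le_max_right _ _
      · exact le_trans (hcov x y hxv hyv hxy hgap hix (by omega)) (le_max_left _ _)

-- the scan computes exactly the maximum adjacent gap M
theorem pvScan_eq (v : List Int) (lo hi w : Int) (h : Int) (t : List Int)
    (hs : PySem.List.sorted v (fun x => x) false = h :: t)
    (hlo_mem : lo ∈ v) (hlo_min : ∀ y ∈ v, lo ≤ y)
    (hhi_mem : hi ∈ v) (hhi_max : ∀ y ∈ v, y ≤ hi)
    (hw : 0 < w)
    (hwM : w ≤ (pvDiffs h t).foldl max 0) :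
    ((PySem.List.pyRange 0 (PySem.Int.floordiv (hi - lo) w + 1)).foldl
        (pvBScan (v.foldl (pvBStep lo w) PySem.Dict.empty)) (0, lo)).1 = (pvDiffs h t).foldl max 0 := by
  have hperm := PySem.List.sorted_perm v (fun x => x) false
  rw [hs] at hperm
  have hmem : ∀ z : Int, z ∈ h :: t ↔ z ∈ v := fun z => hperm.mem_iff
  have hpw : (h :: t).Pairwise (· ≤ ·) := by
    have hp := PySem.List.sorted_pairwise v (fun x => x)
    rw [hs] at hp
    exact hp
  have hM0 : 0 ≤ (pvDiffs h t).foldl max 0 := (PySem.List.le_foldl_max _ 0).1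
  have hgapM : ∀ x y : Int, x ∈ v → y ∈ v → x < y → (∀ z ∈ v, z ≤ x ∨ y ≤ z) →
      y - x ≤ (pvDiffs h t).foldl max 0 := by
    intro x y hx hy hxy hgap
    have hm : y - x ∈ pvDiffs h t :=
      pvGapMem h t hpw ((hmem x).mpr hx) ((hmem y).mpr hy) hxy
        (fun z hz => hgap z ((hmem z).mp hz))
    exact (PySem.List.le_foldl_max _ 0).2 _ hm
  have hlohi : lo ≤ hi := hlo_min hi hhi_mem
  have hK0 : 0 ≤ PySem.Int.floordiv (hi - lo) w := by
    rw [PySem.Int.le_floordiv_iff_mul_le hw]; omega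
  have hNat : PySem.Int.floordiv (hi - lo) w + 1
      = (((PySem.Int.floordiv (hi - lo) w).toNat + 1 : Nat) : Int) := by
    push_cast
    rw [Int.toNat_of_nonneg hK0]
  have hbase : pvInv v lo w ((pvDiffs h t).foldl max 0) 0 (0, lo) := by
    refine ⟨hlo_mem, ?_, Or.inl rfl, le_refl 0, hM0, ?_⟩
    · intro x hx hc
      have := pvIdx_nonneg (lo := lo) (w := w) hw (hlo_min x hx)
      simp at hc
      omega
    · intro x y _ hyv _ _ _ hiy
      have := pvIdx_nonneg (lo := lo) (w := w) hw (hlo_min y hyv)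
      simp at hiy
      omega
  have hinv := pvFold_range_inv (pvBScan (v.foldl (pvBStep lo w) PySem.Dict.empty)) (0, lo)
      (pvInv v lo w ((pvDiffs h t).foldl max 0)) hbase
      (pvInv_step v lo hi w ((pvDiffs h t).foldl max 0) hlo_min hhi_max hw hM0 hgapM)
      ((PySem.Int.floordiv (hi - lo) w).toNat + 1)
  rw [← hNat] at hinv
  obtain ⟨_, _, _, _, hle, hcov⟩ := hinv
  apply le_antisymm hle
  -- the maximum gap is attained and counted by the scan
  rcases PySem.List.foldl_max_mem (pvDiffs h t) 0 with h0 | hMmem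
  · omega
  · obtain ⟨x, y, hx, hy, hyx, hgap⟩ := pvDiffMem h t hpw hMmem
    have hxv : x ∈ v := (hmem x).mp hx
    have hyv : y ∈ v := (hmem y).mp hy
    have hMw : w ≤ y - x := by omega
    have hxy : x < y := by omega
    have hcross : pvIdx lo w x < pvIdx lo w y := by
      have hle' := pvIdx_mono (lo := lo) hw (le_of_lt hxy)
      rcases lt_or_ge (pvIdx lo w x) (pvIdx lo w y) with h' | h'
      · exact h'
      · exfalso
        have heq : pvIdx lo w x = pvIdx lo w y := le_antisymm hle' h'
        have hx1 : pvIdx lo w x * w ≤ x - lo := by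
          rw [← PySem.Int.le_floordiv_iff_mul_le hw]
          exact le_of_eq rfl
        have hpy : pvIdx lo w y = PySem.Int.floordiv (y - lo) w := rfl
        have h2 : PySem.Int.floordiv (y - lo) w < pvIdx lo w x + 1 := by omega
        have h3 := (PySem.Int.floordiv_lt_iff_lt_mul hw).mp h2
        have h4 : (pvIdx lo w x + 1) * w = pvIdx lo w x * w + w := by ring
        omega
    have hiyK : pvIdx lo w y < PySem.Int.floordiv (hi - lo) w + 1 := by
      have := pvIdx_mono (lo := lo) hw (hhi_max y hyv)
      have hKidx : pvIdx lo w hi = PySem.Int.floordiv (hi - lo) w := rfl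
      omega
    have := hcov x y hxv hyv hxy (fun z hz => hgap z ((hmem z).mpr hz)) hcross
      (by rw [← hNat]; exact hiyK)
    omega

-- pigeonhole: the ceiling of the average gap is at most the maximum gap
theorem pvM_ge_w (v : List Int) (lo hi : Int) (h : Int) (t : List Int)
    (hs : PySem.List.sorted v (fun x => x) false = h :: t)
    (ht : t ≠ [])
    (hlo : h = lo) (hhi : t.getLastD h = hi)
    (hlohi : lo < hi) :
    -(PySem.Int.floordiv (lo - hi) ((v.length : Int) - 1)) ≤ (pvDiffs h t).foldl max 0 := by
  have hperm := PySem.List.sorted_perm v (fun x => x) false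
  rw [hs] at hperm
  have hlen : v.length = t.length + 1 := by
    have hl := hperm.length_eq
    simp at hl
    omega
  have htl : 1 ≤ t.length := List.length_pos_iff.mpr ht
  have hm : (0 : Int) < (v.length : Int) - 1 := by
    have : (v.length : Int) = (t.length : Int) + 1 := by exact_mod_cast congrArg (Nat.cast : Nat → Int) hlen
    have : (1 : Int) ≤ (t.length : Int) := by exact_mod_cast htl
    omega
  have hsum : (pvDiffs h t).sum = hi - lo := by rw [pvDiffs_sum, hhi, hlo]
  have hcard := List.sum_le_card_nsmul (pvDiffs h t) _ (PySem.List.le_foldl_max (pvDiffs h t) 0).2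
  rw [pvDiffs_length, hsum, nsmul_eq_mul] at hcard
  have hcast : ((v.length : Int) - 1) = (t.length : Int) := by
    have : (v.length : Int) = (t.length : Int) + 1 := by exact_mod_cast congrArg (Nat.cast : Nat → Int) hlen
    omega
  have key : hi - lo ≤ ((v.length : Int) - 1) * ((pvDiffs h t).foldl max 0) := by
    rw [hcast]; exact hcard
  have hfd : -((pvDiffs h t).foldl max 0) ≤ PySem.Int.floordiv (lo - hi) ((v.length : Int) - 1) := by
    rw [PySem.Int.le_floordiv_iff_mul_le hm]
    nlinarith [key]
  omega

-- helper: fold of max over a list of zeros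
theorem pvFoldZero (xs : List Int) (a : Int) (hne : xs ≠ []) (hz : ∀ x ∈ xs, x = 0) :
    xs.foldl max a = max a 0 := by
  induction xs generalizing a with
  | nil => exact absurd rfl hne
  | cons x xs ih =>
    have hx : x = 0 := hz x (by simp)
    subst hx
    simp only [List.foldl_cons]
    cases hxs : xs with
    | nil => rfl
    | cons y ys =>
      rw [← hxs, ih (max a 0) (by simp [hxs]) (fun z hz' => hz z (by simp [hz'])), max_assoc, max_self]

-- A's value in terms of the sorted chain
theorem pvA_eq (l : Int) (v : List Int) (h : Int) (t : List Int)
    (hs : PySem.List.sorted v (fun x => x) false = h :: t) :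
    solution l v = max ((pvGaps h t).foldl max h) (l - t.getLastD h) := by
  unfold solution
  rw [hs]
  simp only []
  rw [PySem.List.slice_from_one, PySem.List.slice_to_neg_one]
  simp only [List.tail_cons]
  rw [pv_dist_eq]
  rw [PySem.List.pyGetD_zero_cons, PySem.List.pyGetD_neg_one (h :: t) 0 (by simp),
      List.getLast_eq_getLastD]
  rw [pv_max_append]

-- ===== VERDICT (by name: the statement is the Claim_ definition above) =====
theorem solution_spec : Claim_equal_solution := by
  intro l v _ hpre
  unfold Spec_solution
  cases hlo : PySem.List.min? v (fun y => y) with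
  | none => exact absurd ((PySem.List.min?_eq_none_iff v fun y => y).mp hlo) hpre
  | some lo =>
  cases hhi : PySem.List.max? v (fun y => y) with
  | none => exact absurd ((PySem.List.max?_eq_none_iff v fun y => y).mp hhi) hpre
  | some hi =>
  cases hst : PySem.List.sorted v (fun x => x) false with
  | nil => exact absurd ((PySem.List.sorted_eq_nil_iff v (fun x => x) false).mp hst) hpre
  | cons h t =>
  have hperm := PySem.List.sorted_perm v (fun x => x) false
  rw [hst] at hperm
  have hmemv : ∀ z : Int, z ∈ h :: t ↔ z ∈ v := fun z => hperm.mem_iff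
  have hpw : (h :: t).Pairwise (· ≤ ·) := by
    have hp := PySem.List.sorted_pairwise v (fun x => x)
    rw [hst] at hp
    exact hp
  have hlo_min : ∀ y ∈ v, lo ≤ y := PySem.List.min?_isMin hlo
  have hlo_mem : lo ∈ v := PySem.List.min?_mem hlo
  have hhi_max : ∀ y ∈ v, y ≤ hi := PySem.List.max?_isMax hhi
  have hhi_mem : hi ∈ v := PySem.List.max?_mem hhi
  have hH : h = lo :=
    le_antisymm (PySem.List.key_head_sorted_le v (fun x => x) hst lo hlo_mem)
      (hlo_min h ((hmemv h).mp (by simp)))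
  have hLast : t.getLastD h = hi :=
    le_antisymm (hhi_max _ ((hmemv _).mp List.getLastD_mem_cons))
      (pvLast_max h t hpw hi ((hmemv hi).mpr hhi_mem))
  have hlen : t.length + 1 = v.length := by
    have := hperm.length_eq
    simpa using this
  rw [pvA_eq l v h t hst]
  unfold solution_alt
  rw [hlo, hhi]
  simp only []
  by_cases hn1 : (v.length : Int) = 1
  · -- single lamp
    have ht0 : t = [] := by
      have hv1 : v.length = 1 := by exact_mod_cast hn1
      have : t.length = 0 := by omega
      exact List.length_eq_zero_iff.mp this
    subst ht0
    rw [if_pos hn1, pvIfMax]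
    have hhl : hi = h := by rw [← hLast]; rfl
    simp only [pvGaps, List.foldl_nil, List.getLastD_nil]
    rw [hH, hhl, hH]
  · rw [if_neg hn1]
    have ht : t ≠ [] := by
      intro h0
      subst h0
      simp at hlen
      rw [← hlen] at hn1
      simp at hn1
    have hm : (0 : Int) < (v.length : Int) - 1 := by
      have h1 : 1 ≤ v.length := List.length_pos_iff.mpr hpre
      have h2 : (1 : Int) ≤ (v.length : Int) := by exact_mod_cast h1
      omega
    by_cases hhl : hi = lo
    · -- all lamps at the same spot
      rw [if_pos hhl]
      have hall : ∀ z ∈ h :: t, z = lo := fun z hz =>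
        le_antisymm (hhl ▸ hhi_max z ((hmemv z).mp hz)) (hlo_min z ((hmemv z).mp hz))
      have hg0 : ∀ g ∈ pvGaps h t, g = 0 := by
        intro g hg
        rw [pvGaps_eq_map] at hg
        obtain ⟨d, hd, hdg⟩ := List.mem_map.mp hg
        obtain ⟨x, y, hx, hy, hxy, _⟩ := pvDiffMem h t hpw hd
        rw [hall x hx, hall y hy] at hxy
        have hdz : d = 0 := by omega
        rw [← hdg, hdz]
        decide
      have hgne : pvGaps h t ≠ [] := by
        cases t with
        | nil => exact absurd rfl ht
        | cons a b => simp [pvGaps]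
      rw [pvFoldZero _ _ hgne hg0, pvIfMax, pvIfMax, hLast, hH, hhl, max_right_comm]
    · -- the genuine bucket case
      rw [if_neg hhl]
      have hlohi : lo < hi := lt_of_le_of_ne (hlo_min hi hhi_mem) (fun e => hhl e.symm)
      have hwM := pvM_ge_w v lo hi h t hst ht hH hLast hlohi
      have hw : (0 : Int) < -(PySem.Int.floordiv (lo - hi) ((v.length : Int) - 1)) := by
        have hneg : PySem.Int.floordiv (lo - hi) ((v.length : Int) - 1) < 0 := by
          rw [PySem.Int.floordiv_lt_iff_lt_mul hm]
          omega
        omega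
      have hscan := pvScan_eq v lo hi (-(PySem.Int.floordiv (lo - hi) ((v.length : Int) - 1)))
        h t hst hlo_mem hlo_min hhi_mem hhi_max hw hwM
      rw [hscan]
      cases t with
      | nil => exact absurd rfl ht
      | cons t0 t' =>
      have hd0 : 0 ≤ t0 - h := by
        have := pvDiffs_nonneg h (t0 :: t') hpw (t0 - h) (by simp [pvDiffs])
        omega
      have hA : (pvGaps h (t0 :: t')).foldl max h
          = max h (pvHalf ((pvDiffs h (t0 :: t')).foldl max 0)) := by
        rw [pvGaps_eq_map]
        simp only [pvDiffs, List.map_cons, List.foldl_cons]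
        rw [pv_foldl_max_max, pvFoldMap_mono]
        congr 2
        rw [max_eq_right hd0]
      rw [hA, pvIfMax, pvIfMax, hLast, hH, max_right_comm, max_comm]
      rfl
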